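-- pv_equiv track=rewrite | github.com/iken008/hyperspec-viewer | src/spectral_viewer_v1.6.7.py | _canon_poly
-- ===== SOURCE A (Python) =====
-- def _canon_poly(verts) -> tuple:
--     """Canonicalize polygon vertices for comparison."""
--     V = tuple((int(x), int(y)) for x, y in (verts or []))
--     if len(V) < 3:
--         return V
--
--     rotations = [V[i:] + V[:i] for i in range(len(V))]
--     rev = V[::-1]
--     rotations += [rev[i:] + rev[:i] for i in range(len(rev))]
--
--     return min(rotations)
-- ===== SOURCE B (Python) =====
-- def _canon_poly(verts) -> tuple:
--     """Canonicalize polygon vertices for comparison."""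
--     V = tuple((int(x), int(y)) for x, y in (verts or []))
--     n = len(V)
--     if n < 3:
--         return V
--     # Candidate-elimination ("radix select"): candidates are start indices into the two
--     # doubled sequences; each column pass keeps only the starts whose next vertex is
--     # minimal, narrowing until one survivor remains. No rotation tuples are built and
--     # no tuple-vs-tuple comparisons are made.
--     W = V + V
--     R = V[::-1]
--     RR = R + R
--     cands = [(W, i) for i in range(n)] + [(RR, i) for i in range(n)]
--     for k in range(n):
--         if len(cands) == 1:
--             break
--         m = min(s[i + k] for s, i in cands)
--         cands = [(s, i) for (s, i) in cands if s[i + k] == m]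
--     s, i = cands[0]
--     return s[i:i + n]
-- ===== Notes on version B (the rewrite author's own statement) =====
-- stated objective: faster
-- what changed: B replaces 'materialise all 2n rotation tuples and call min' by candidate elimination (radix select): start indices into the two doubled sequences are narrowed column by column to the minimal next vertex, with early exit once a single survivor remains, so no rotation tuples are built and no tuple comparisons are performed.
import Mathlib
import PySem

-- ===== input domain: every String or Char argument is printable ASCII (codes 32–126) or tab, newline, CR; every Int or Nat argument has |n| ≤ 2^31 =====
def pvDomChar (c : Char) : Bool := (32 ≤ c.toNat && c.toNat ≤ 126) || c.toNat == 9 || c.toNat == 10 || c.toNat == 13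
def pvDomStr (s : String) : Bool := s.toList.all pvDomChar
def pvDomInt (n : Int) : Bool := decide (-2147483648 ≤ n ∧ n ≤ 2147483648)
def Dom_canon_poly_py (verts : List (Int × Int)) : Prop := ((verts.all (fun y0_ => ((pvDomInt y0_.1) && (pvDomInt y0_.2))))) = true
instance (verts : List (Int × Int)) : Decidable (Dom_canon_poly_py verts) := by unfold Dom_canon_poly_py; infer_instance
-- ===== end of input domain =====

-- B replaces "materialise all 2n rotations and take min" by candidate elimination (radix
-- select) over start indices into the two doubled sequences (objective: faster, constant/typical).

-- Python '<' on int pairs (exact for tuple comparison of two int 2-tuples)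
def pvLtPt (a b : Int × Int) : Bool := a.1 < b.1 || (a.1 == b.1 && a.2 < b.2)

-- Python '<' on tuples of int pairs: lexicographic, strict prefix is smaller (exact)
def pvLtPoly : List (Int × Int) → List (Int × Int) → Bool
  | [], [] => false
  | [], _ :: _ => true
  | _ :: _, [] => false
  | a :: as, b :: bs => pvLtPt a b || (a == b && pvLtPoly as bs)

-- ===== PORT A =====
def canon_poly_py (verts : List (Int × Int)) : List (Int × Int) :=
  -- V = tuple((int(x), int(y)) ...) is the identity on a list of int pairs; 'verts or []' = verts
  let V := verts
  if V.length < 3 then V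
  else
    -- V[i:] + V[:i] for 0 ≤ i < len(V): drop/take are exact here
    let rotations := (List.range V.length).map (fun i => V.drop i ++ V.take i)
    let rev := V.reverse  -- V[::-1]
    let rotations := rotations ++ (List.range rev.length).map (fun i => rev.drop i ++ rev.take i)
    -- min(rotations): first minimal element = running-min fold over the tail
    match rotations with
    | [] => []  -- unreachable: len(V) ≥ 3 (Python min would raise on an empty list)
    | h :: t => t.foldl (fun b c => if pvLtPoly c b then c else b) h

-- ===== PORT B =====
-- s[j] for an in-range index j (B only ever indexes inside the doubled sequences)
def pvAt (s : List (Int × Int)) (j : Nat) : Int × Int := s.getD j (0, 0)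

-- m = min(s[i + k] for s, i in cands): running min (first minimal) over the generator
def pvColMin (cands : List (List (Int × Int) × Nat)) (k : Nat) : Int × Int :=
  match cands with
  | [] => (0, 0)  -- unreachable: Python min would raise on an empty generator
  | c :: t => t.foldl (fun m p => if pvLtPt (pvAt p.1 (p.2 + k)) m then pvAt p.1 (p.2 + k) else m)
      (pvAt c.1 (c.2 + k))

-- one iteration of B's loop body; Python's 'break' at len(cands)==1 is the identity on the
-- state from then on, so it is ported as the same guard skipping the filter
def pvStepB (cands : List (List (Int × Int) × Nat)) (k : Nat) : List (List (Int × Int) × Nat) :=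
  if cands.length == 1 then cands
  else
    let m := pvColMin cands k
    cands.filter (fun p => pvAt p.1 (p.2 + k) == m)

def canon_poly_py_alt (verts : List (Int × Int)) : List (Int × Int) :=
  let V := verts
  let n := V.length
  if n < 3 then V
  else
    let W := V ++ V
    let RR := V.reverse ++ V.reverse
    let cands0 := (List.range n).map (fun i => (W, i)) ++ (List.range n).map (fun i => (RR, i))
    let cands := (List.range n).foldl pvStepB cands0
    match cands with
    | [] => []  -- unreachable: the candidate list never becomes empty
    | (s, i) :: _ => (s.drop i).take n  -- s[i:i+n]

-- ===== PRECONDITION & SPEC =====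
def Spec_canon_poly_py (verts : List (Int × Int)) (out : List (Int × Int)) : Prop := out = canon_poly_py_alt verts
instance (verts : List (Int × Int)) (out : List (Int × Int)) : Decidable (Spec_canon_poly_py verts out) := by unfold Spec_canon_poly_py; infer_instance

-- ===== CLAIM (what is proved, stated in full; the proofs are below) =====
def Claim_equal_canon_poly_py : Prop := ∀ (verts : List (Int × Int)), Dom_canon_poly_py verts → Spec_canon_poly_py verts (canon_poly_py verts)

-- ===== LEMMAS AND PROOFS =====

-- ---- order facts on points ----
theorem pvPt_irrefl (a : Int × Int) : pvLtPt a a = false := by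
  simp [pvLtPt]

theorem pvPt_T1 {a b c : Int × Int} (h1 : pvLtPt a b = true) (h2 : pvLtPt b c = true) :
    pvLtPt a c = true := by
  rcases a with ⟨a1, a2⟩; rcases b with ⟨b1, b2⟩; rcases c with ⟨c1, c2⟩
  simp only [pvLtPt, Bool.or_eq_true, Bool.and_eq_true, decide_eq_true_eq, beq_iff_eq] at *
  omega

theorem pvPt_T2 {a b c : Int × Int} (h1 : pvLtPt b a = false) (h2 : pvLtPt b c = true) :
    pvLtPt a c = true := by
  rcases a with ⟨a1, a2⟩; rcases b with ⟨b1, b2⟩; rcases c with ⟨c1, c2⟩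
  simp only [pvLtPt, Bool.or_eq_true, Bool.and_eq_true, decide_eq_true_eq, beq_iff_eq,
    Bool.or_eq_false_iff, Bool.and_eq_false_iff, decide_eq_false_iff_not, beq_eq_false_iff_ne] at *
  omega

theorem pvPt_conn {a b : Int × Int} (h1 : pvLtPt a b = false) (h2 : pvLtPt b a = false) :
    a = b := by
  rcases a with ⟨a1, a2⟩; rcases b with ⟨b1, b2⟩
  simp only [pvLtPt, Bool.or_eq_false_iff, Bool.and_eq_false_iff, decide_eq_false_iff_not,
    beq_eq_false_iff_ne, Prod.mk.injEq] at *
  omega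

theorem pvPt_asymm {a b : Int × Int} (h : pvLtPt a b = true) : pvLtPt b a = false := by
  rcases a with ⟨a1, a2⟩; rcases b with ⟨b1, b2⟩
  simp only [pvLtPt, Bool.or_eq_true, Bool.and_eq_true, decide_eq_true_eq, beq_iff_eq,
    Bool.or_eq_false_iff, Bool.and_eq_false_iff, decide_eq_false_iff_not, beq_eq_false_iff_ne] at *
  omega

-- ---- order facts on tuples of points ----
theorem pvPoly_irrefl : ∀ a : List (Int × Int), pvLtPoly a a = false
  | [] => rfl
  | x :: xs => by simp [pvLtPoly, pvPt_irrefl, pvPoly_irrefl xs]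

theorem pvPoly_asymm : ∀ {a b : List (Int × Int)}, pvLtPoly a b = true → pvLtPoly b a = false
  | [], [], h => by simp [pvLtPoly] at h
  | [], _ :: _, _ => rfl
  | _ :: _, [], h => by simp [pvLtPoly] at h
  | x :: xs, y :: ys, h => by
      simp only [pvLtPoly, Bool.or_eq_true, Bool.and_eq_true, beq_iff_eq] at h
      rcases h with h | ⟨rfl, h⟩
      · simp [pvLtPoly, pvPt_asymm h]
        intro rfl'
        subst rfl'
        simp [pvPt_irrefl] at h
      · simp [pvLtPoly, pvPt_irrefl, pvPoly_asymm h]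

theorem pvPoly_conn : ∀ {a b : List (Int × Int)},
    pvLtPoly a b = false → pvLtPoly b a = false → a = b
  | [], [], _, _ => rfl
  | [], _ :: _, h1, _ => by simp [pvLtPoly] at h1
  | _ :: _, [], _, h2 => by simp [pvLtPoly] at h2
  | x :: xs, y :: ys, h1, h2 => by
      simp only [pvLtPoly, Bool.or_eq_false_iff, Bool.and_eq_false_iff, beq_eq_false_iff_ne] at h1 h2
      obtain ⟨hp1, hr1⟩ := h1
      obtain ⟨hp2, hr2⟩ := h2
      have hxy : x = y := pvPt_conn hp1 hp2
      subst hxy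
      rcases hr1 with h | h
      · exact absurd rfl h
      · rcases hr2 with h' | h'
        · exact absurd rfl h'
        · rw [pvPoly_conn h h']

theorem pvPoly_T1 : ∀ {a b c : List (Int × Int)},
    pvLtPoly a b = true → pvLtPoly b c = true → pvLtPoly a c = true := by
  intro a
  induction a with
  | nil =>
      intro b c h1 h2
      cases b with
      | nil => simp [pvLtPoly] at h1
      | cons y ys =>
          cases c with
          | nil => simp [pvLtPoly] at h2
          | cons z zs => rfl
  | cons x xs ih =>
      intro b c h1 h2
      cases b with
      | nil => simp [pvLtPoly] at h1
      | cons y ys =>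
          cases c with
          | nil => simp [pvLtPoly] at h2
          | cons z zs =>
              simp only [pvLtPoly, Bool.or_eq_true, Bool.and_eq_true, beq_iff_eq] at h1 h2 ⊢
              rcases h1 with h1 | ⟨rfl, h1⟩
              · rcases h2 with h2 | ⟨rfl, h2⟩
                · exact Or.inl (pvPt_T1 h1 h2)
                · exact Or.inl h1
              · rcases h2 with h2 | ⟨rfl, h2⟩
                · exact Or.inl h2
                · exact Or.inr ⟨rfl, ih h1 h2⟩

theorem pvPoly_T2 : ∀ {a b c : List (Int × Int)},
    pvLtPoly b a = false → pvLtPoly b c = true → pvLtPoly a c = true := by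
  intro a
  induction a with
  | nil =>
      intro b c h1 h2
      cases b with
      | nil =>
          cases c with
          | nil => simp [pvLtPoly] at h2
          | cons z zs => rfl
      | cons y ys =>
          cases c with
          | nil => simp [pvLtPoly] at h2
          | cons z zs => rfl
  | cons x xs ih =>
      intro b c h1 h2
      cases b with
      | nil => simp [pvLtPoly] at h1
      | cons y ys =>
          cases c with
          | nil => simp [pvLtPoly] at h2
          | cons z zs =>
              simp only [pvLtPoly, Bool.or_eq_true, Bool.and_eq_true, beq_iff_eq,
                Bool.or_eq_false_iff, Bool.and_eq_false_iff, beq_eq_false_iff_ne] at h1 h2 ⊢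
              obtain ⟨hp, hr⟩ := h1
              rcases h2 with h2 | ⟨rfl, h2⟩
              · exact Or.inl (pvPt_T2 hp h2)
              · by_cases hxy : pvLtPt x y = true
                · exact Or.inl hxy
                · have hx : x = y := pvPt_conn (Bool.eq_false_iff.mpr hxy) hp
                  subst hx
                  rcases hr with h | h
                  · exact absurd rfl h
                  · exact Or.inr ⟨rfl, ih h h2⟩

-- ---- generic running-min fold (first minimal element) ----
theorem pv_foldl_min {α : Type} (lt : α → α → Bool)
    (T1 : ∀ a b c, lt a b = true → lt b c = true → lt a c = true)
    (T2 : ∀ a b c, lt b a = false → lt b c = true → lt a c = true)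
    (Irr : ∀ a, lt a a = false) :
    ∀ (t : List α) (h : α),
      (t.foldl (fun m v => if lt v m then v else m) h ∈ h :: t) ∧
      (∀ x ∈ h :: t, lt x (t.foldl (fun m v => if lt v m then v else m) h) = false) := by
  intro t
  induction t with
  | nil =>
      intro a
      refine ⟨List.mem_singleton.mpr rfl, ?_⟩
      intro x hx
      rw [List.mem_singleton.mp hx]
      exact Irr _
  | cons y t ih =>
      intro a
      simp only [List.foldl_cons]
      by_cases hvh : lt y a = true
      · rw [if_pos hvh]
        obtain ⟨ihm, ihall⟩ := ih y
        refine ⟨?_, ?_⟩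
        · rcases List.mem_cons.mp ihm with h1 | h1
          · rw [h1]; exact List.mem_cons_of_mem _ (List.mem_cons_self ..)
          · exact List.mem_cons_of_mem _ (List.mem_cons_of_mem _ h1)
        · intro x hx
          rcases List.mem_cons.mp hx with rfl | hx2
          · -- x = a: y < a and y is a lower bound of the new fold
            cases har : lt x (t.foldl (fun m v => if lt v m then v else m) y) with
            | false => rfl
            | true =>
                have hyr := T1 y x _ hvh har
                rw [ihall y (List.mem_cons_self ..)] at hyr
                exact hyr.symm
          · exact ihall x hx2
      · rw [if_neg hvh]
        obtain ⟨ihm, ihall⟩ := ih a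
        refine ⟨?_, ?_⟩
        · rcases List.mem_cons.mp ihm with h1 | h1
          · rw [h1]; exact List.mem_cons_self ..
          · exact List.mem_cons_of_mem _ (List.mem_cons_of_mem _ h1)
        · intro x hx
          rcases List.mem_cons.mp hx with rfl | hx2
          · exact ihall x (List.mem_cons_self ..)
          · rcases List.mem_cons.mp hx2 with rfl | hx3
            · -- x = y, rejected by the head comparison
              cases hyr : lt x (t.foldl (fun m v => if lt v m then v else m) a) with
              | false => rfl
              | true =>
                  have har := T2 a x _ (Bool.eq_false_iff.mpr hvh) hyr
                  rw [ihall a (List.mem_cons_self ..)] at har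
                  exact har.symm
            · exact ihall x (List.mem_cons_of_mem _ hx3)

-- ---- windows of the doubled sequences ----
def pvWin (n : Nat) (c : List (Int × Int) × Nat) : List (Int × Int) := (c.1.drop c.2).take n

theorem pv_window_eq (V : List (Int × Int)) (i : Nat) (h : i ≤ V.length) :
    ((V ++ V).drop i).take V.length = V.drop i ++ V.take i := by
  rw [List.drop_append_of_le_length h, List.take_append]
  have hlen : (V.drop i).length = V.length - i := List.length_drop ..
  rw [hlen, show V.length - (V.length - i) = i from by omega,
    List.take_of_length_le (by rw [hlen]; omega)]

theorem pvWin_length {n : Nat} {c : List (Int × Int) × Nat} (h : c.2 + n ≤ c.1.length) :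
    (pvWin n c).length = n := by
  simp only [pvWin, List.length_take, List.length_drop]
  omega

theorem pvAt_win {n k : Nat} {c : List (Int × Int) × Nat}
    (_h : c.2 + n ≤ c.1.length) (hk : k < n) :
    pvAt c.1 (c.2 + k) = (pvWin n c).getD k (0, 0) := by
  simp only [pvAt, pvWin, List.getD_eq_getElem?_getD, List.getElem?_take_of_lt hk,
    List.getElem?_drop]

theorem pv_take_succ_getD {α : Type} (l : List α) (k : Nat) (d : α) (h : k < l.length) :
    l.take (k + 1) = l.take k ++ [l.getD k d] := by
  rw [List.take_add_one, List.getElem?_eq_getElem h]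
  simp [List.getD_eq_getElem?_getD, List.getElem?_eq_getElem h]

-- strict prefix comparison extends to longer lists (equal-length prefixes)
theorem pvPoly_append_lt : ∀ {a b : List (Int × Int)} (a' b' : List (Int × Int)),
    a.length = b.length → pvLtPoly a b = true → pvLtPoly (a ++ a') (b ++ b') = true := by
  intro a
  induction a with
  | nil =>
      intro b a' b' hl h
      cases b with
      | nil => simp [pvLtPoly] at h
      | cons y ys => simp at hl
  | cons x xs ih =>
      intro b a' b' hl h
      cases b with
      | nil => simp at hl
      | cons y ys =>
          simp only [List.cons_append, pvLtPoly, Bool.or_eq_true, Bool.and_eq_true,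
            beq_iff_eq] at h ⊢
          rcases h with h | ⟨rfl, h⟩
          · exact Or.inl h
          · exact Or.inr ⟨rfl, ih _ _ (by simpa using hl) h⟩

theorem pvPoly_append_same : ∀ (p xs ys : List (Int × Int)),
    pvLtPoly (p ++ xs) (p ++ ys) = pvLtPoly xs ys
  | [], _, _ => rfl
  | a :: p, xs, ys => by
      simp [pvLtPoly, pvPt_irrefl, pvPoly_append_same p xs ys]

-- ===== the invariant of B's elimination loop =====
def pvInv (n : Nat) (C0 : List (List (Int × Int) × Nat)) (k : Nat)
    (C : List (List (Int × Int) × Nat)) : Prop :=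
  C ≠ [] ∧ (∀ c ∈ C, c ∈ C0) ∧
  (∀ c ∈ C, ∀ c' ∈ C, (pvWin n c).take k = (pvWin n c').take k) ∧
  (∀ d ∈ C0, d ∈ C ∨ ∀ c ∈ C, pvLtPoly ((pvWin n c).take k) ((pvWin n d).take k) = true)

theorem pvColMin_spec (C : List (List (Int × Int) × Nat)) (k : Nat) (hC : C ≠ []) :
    (pvColMin C k ∈ C.map (fun c => pvAt c.1 (c.2 + k))) ∧
    (∀ c ∈ C, pvLtPt (pvAt c.1 (c.2 + k)) (pvColMin C k) = false) := by
  match C with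
  | [] => exact absurd rfl hC
  | c :: t =>
      have := pv_foldl_min pvLtPt (fun _ _ _ => pvPt_T1) (fun _ _ _ => pvPt_T2)
        pvPt_irrefl (t.map (fun c => pvAt c.1 (c.2 + k))) (pvAt c.1 (c.2 + k))
      rw [List.foldl_map] at this
      obtain ⟨hm, hall⟩ := this
      have hcol : pvColMin (c :: t) k
          = t.foldl (fun m p => if pvLtPt (pvAt p.1 (p.2 + k)) m then pvAt p.1 (p.2 + k) else m)
              (pvAt c.1 (c.2 + k)) := rfl
      constructor
      · rw [hcol]
        simpa using hm
      · intro d hd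
        rw [hcol]
        rcases List.mem_cons.mp hd with rfl | hd
        · exact hall _ (List.mem_cons_self ..)
        · exact hall _ (List.mem_cons_of_mem _ (List.mem_map_of_mem hd))

theorem pvInv_step (n : Nat) (C0 C : List (List (Int × Int) × Nat)) (k : Nat)
    (hk : k < n) (hbound : ∀ c ∈ C0, c.2 + n ≤ c.1.length)
    (hI : pvInv n C0 k C) : pvInv n C0 (k + 1) (pvStepB C k) := by
  obtain ⟨hne, hsub, heq, hmin⟩ := hI
  have hwl : ∀ c ∈ C0, (pvWin n c).length = n := fun c hc => pvWin_length (hbound c hc)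
  -- take (k+1) of a window = take k ++ [column value]
  have htk : ∀ c ∈ C0, (pvWin n c).take (k + 1)
      = (pvWin n c).take k ++ [pvAt c.1 (c.2 + k)] := by
    intro c hc
    rw [pvAt_win (hbound c hc) hk]
    exact pv_take_succ_getD _ k _ (by rw [hwl c hc]; omega)
  -- equal-length prefixes
  have hpl : ∀ c ∈ C0, ((pvWin n c).take k).length = k := by
    intro c hc
    rw [List.length_take, hwl c hc]; omega
  -- step: strict prefix lt extends one column
  have hext : ∀ c ∈ C0, ∀ d ∈ C0,
      pvLtPoly ((pvWin n c).take k) ((pvWin n d).take k) = true →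
      pvLtPoly ((pvWin n c).take (k + 1)) ((pvWin n d).take (k + 1)) = true := by
    intro c hc d hd h
    rw [htk c hc, htk d hd]
    exact pvPoly_append_lt _ _ (by rw [hpl c hc, hpl d hd]) h
  unfold pvStepB
  by_cases h1 : C.length == 1
  · rw [if_pos h1]
    refine ⟨hne, hsub, ?_, ?_⟩
    · -- C is a singleton
      have : C.length = 1 := by simpa using h1
      obtain ⟨a, ha⟩ := List.length_eq_one_iff.mp this
      subst ha
      intro c hc c' hc'
      rw [List.mem_singleton.mp hc, List.mem_singleton.mp hc']
    · intro d hd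
      rcases hmin d hd with h | h
      · exact Or.inl h
      · exact Or.inr (fun c hc => hext c (hsub c hc) d hd (h c hc))
  · rw [if_neg h1]
    obtain ⟨hmem, hmall⟩ := pvColMin_spec C k hne
    obtain ⟨cw, hcw, hcwv⟩ := List.mem_map.mp hmem
    have hcwin : cw ∈ C.filter (fun p => pvAt p.1 (p.2 + k) == pvColMin C k) :=
      List.mem_filter.mpr ⟨hcw, by simp [hcwv]⟩
    refine ⟨fun hemp => by rw [hemp] at hcwin; simp at hcwin,
        fun c hc => hsub c (List.mem_filter.mp hc).1, ?_, ?_⟩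
    · intro c hc c' hc'
      obtain ⟨hcC, hcv⟩ := List.mem_filter.mp hc
      obtain ⟨hc'C, hc'v⟩ := List.mem_filter.mp hc'
      rw [htk c (hsub c hcC), htk c' (hsub c' hc'C),
        heq c hcC c' hc'C, beq_iff_eq.mp hcv, beq_iff_eq.mp hc'v]
    · intro d hd
      by_cases hdC : d ∈ C
      · by_cases hdF : (pvAt d.1 (d.2 + k) == pvColMin C k) = true
        · exact Or.inl (List.mem_filter.mpr ⟨hdC, hdF⟩)
        · -- d is eliminated at this column: its column value is strictly above the min
          refine Or.inr ?_
          intro c hc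
          obtain ⟨hcC, hcv⟩ := List.mem_filter.mp hc
          have hdne : pvAt d.1 (d.2 + k) ≠ pvColMin C k := by
            simpa using hdF
          have hdnl : pvLtPt (pvAt d.1 (d.2 + k)) (pvColMin C k) = false := hmall d hdC
          have hlt : pvLtPt (pvColMin C k) (pvAt d.1 (d.2 + k)) = true := by
            cases hcon : pvLtPt (pvColMin C k) (pvAt d.1 (d.2 + k)) with
            | true => rfl
            | false => exact absurd (pvPt_conn hdnl hcon) hdne
          rw [htk c (hsub c hcC), htk d (hsub d hdC), heq c hcC d hdC,
            beq_iff_eq.mp hcv, pvPoly_append_same]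
          simp [pvLtPoly, hlt]
      · -- d was eliminated earlier
        rcases hmin d hd with h | h
        · exact absurd h hdC
        · refine Or.inr ?_
          intro c hc
          obtain ⟨hcC, _⟩ := List.mem_filter.mp hc
          exact hext c (hsub c hcC) d hd (h c hcC)

theorem pvInv_iter (n : Nat) (C0 : List (List (Int × Int) × Nat))
    (hbound : ∀ c ∈ C0, c.2 + n ≤ c.1.length) (hne : C0 ≠ []) :
    ∀ k, k ≤ n → pvInv n C0 k ((List.range k).foldl pvStepB C0) := by
  intro k
  induction k with
  | zero =>
      intro _
      refine ⟨hne, fun c hc => hc, ?_, fun d hd => Or.inl hd⟩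
      intro c _ c' _
      simp
  | succ k ih =>
      intro hk1
      rw [List.range_succ, List.foldl_append, List.foldl_cons, List.foldl_nil]
      exact pvInv_step n C0 _ k (by omega) hbound (ih (by omega))

-- the running-min fold returns the (unique) minimum value
theorem pv_min_unique (h : List (Int × Int)) (t : List (List (Int × Int))) (b : List (Int × Int))
    (hbmem : b ∈ h :: t) (hbmin : ∀ x ∈ h :: t, pvLtPoly x b = false) :
    t.foldl (fun m c => if pvLtPoly c m then c else m) h = b := by
  obtain ⟨hm, hall⟩ := pv_foldl_min pvLtPoly (fun _ _ _ => pvPoly_T1)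
    (fun _ _ _ => pvPoly_T2) pvPoly_irrefl t h
  exact pvPoly_conn (hbmin _ hm) (hall b hbmem)

-- ===== VERDICT (by name: the statement is the Claim_ definition above) =====
theorem canon_poly_py_spec : Claim_equal_canon_poly_py := by
  intro verts _
  unfold Spec_canon_poly_py canon_poly_py canon_poly_py_alt
  by_cases hn : verts.length < 3
  · simp [hn]
  · simp only [hn, if_false, List.length_reverse]
    set V := verts with hV
    set n := V.length with hnn
    set W := V ++ V with hW
    set RR := V.reverse ++ V.reverse with hRR
    set C0 := (List.range n).map (fun i => (W, i)) ++ (List.range n).map (fun i => (RR, i)) with hC0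
    have hbound : ∀ c ∈ C0, c.2 + n ≤ c.1.length := by
      intro c hc
      rcases List.mem_append.mp hc with h | h <;>
        · obtain ⟨i, hi, rfl⟩ := List.mem_map.mp h
          simp only [hW, hRR, List.length_append, List.length_reverse]
          have := List.mem_range.mp hi
          omega
    have hC0ne : C0 ≠ [] := by
      simp only [hC0, ne_eq, List.append_eq_nil_iff, List.map_eq_nil_iff, List.range_eq_nil]
      omega
    obtain ⟨hne, hsub, heq, hmin⟩ := pvInv_iter n C0 hbound hC0ne n le_rfl
    set Cn := (List.range n).foldl pvStepB C0 with hCn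
    have hrot : C0.map (pvWin n)
        = (List.range n).map (fun i => V.drop i ++ V.take i)
          ++ (List.range n).map (fun i => V.reverse.drop i ++ V.reverse.take i) := by
      simp only [hC0, List.map_append, List.map_map]
      congr 1
      · refine List.map_congr_left (fun i hi => ?_)
        simp only [Function.comp_apply, pvWin, hW, hnn]
        exact pv_window_eq V i (le_of_lt (List.mem_range.mp hi))
      · refine List.map_congr_left (fun i hi => ?_)
        simp only [Function.comp_apply, pvWin, hRR, hnn]
        have h2 : ((V.reverse ++ V.reverse).drop i).take V.reverse.length
            = V.reverse.drop i ++ V.reverse.take i :=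
          pv_window_eq V.reverse i
            (by rw [List.length_reverse]
                exact le_of_lt (List.mem_range.mp hi))
        simpa using h2
    have hwin_full : ∀ c ∈ C0, (pvWin n c).take n = pvWin n c := fun c hc =>
      List.take_of_length_le (le_of_eq (pvWin_length (hbound c hc)))
    obtain ⟨c0, rest, hCne⟩ := List.exists_cons_of_ne_nil hne
    rcases c0 with ⟨s, i⟩
    have hhd : (s, i) ∈ Cn := by rw [hCne]; exact List.mem_cons_self ..
    have hhd0 : (s, i) ∈ C0 := hsub _ hhd
    have hBmem : pvWin n (s, i) ∈ C0.map (pvWin n) := List.mem_map_of_mem hhd0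
    have hBmin : ∀ x ∈ C0.map (pvWin n), pvLtPoly x (pvWin n (s, i)) = false := by
      intro x hx
      obtain ⟨d, hd, rfl⟩ := List.mem_map.mp hx
      rcases hmin d hd with h | h
      · have hdw : pvWin n d = pvWin n (s, i) := by
          rw [← hwin_full d (hsub d h), ← hwin_full (s, i) hhd0]
          exact heq d h (s, i) hhd
        rw [hdw]; exact pvPoly_irrefl _
      · have h3 := h (s, i) hhd
        rw [hwin_full (s, i) hhd0, hwin_full d hd] at h3
        exact pvPoly_asymm h3
    rw [hCne]
    show (match (List.range n).map (fun i => V.drop i ++ V.take i)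
        ++ (List.range n).map (fun i => V.reverse.drop i ++ V.reverse.take i) with
      | [] => ([] : List (Int × Int))
      | h :: t => t.foldl (fun m c => if pvLtPoly c m then c else m) h) = pvWin n (s, i)
    have hLne : C0.map (pvWin n) ≠ [] := by
      simpa using hC0ne
    obtain ⟨h0, t0, hL⟩ := List.exists_cons_of_ne_nil hLne
    rw [← hrot, hL]
    rw [hL] at hBmem hBmin
    exact pv_min_unique h0 t0 _ hBmem hBmin
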